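-- pv_equiv track=rewrite | github.com/docktermj/senzing-bootcamp-kiro-powers | senzing-bootcamp/tests/test_module3_default_on_properties.py | get_backward_reachable
-- ===== SOURCE A (Python) =====
-- def get_backward_reachable(
--     module_id: int,
--     modules: dict,
--     edge_types: list[str] | None = None,
-- ) -> set[int]:
--     """Find all modules reachable by following edges backward from a module.
--
--     Traverses `requires` and `soft_requires` edges backward (i.e., from
--     a module to its dependencies) using BFS.
--
--     Args:
--         module_id: The starting module to trace backward from.
--         modules: The modules dictionary from module-dependencies.yaml.
--         edge_types: List of edge field names to follow. Defaults to
--             ["requires", "soft_requires"].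
--
--     Returns:
--         Set of module IDs reachable by following edges backward.
--     """
--     if edge_types is None:
--         edge_types = ["requires", "soft_requires"]
--
--     visited: set[int] = set()
--     queue: list[int] = [module_id]
--
--     while queue:
--         current = queue.pop(0)
--         if current in visited:
--             continue
--         visited.add(current)
--
--         mod_data = modules.get(current, {})
--         for edge_type in edge_types:
--             deps = mod_data.get(edge_type, [])
--             if deps is None:
--                 continue
--             for dep in deps:
--                 if dep not in visited:
--                     queue.append(dep)
--
--     # Remove the starting module itself from the reachable set
--     visited.discard(module_id)
--     return visited
-- ===== SOURCE B (Python) =====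
-- def get_backward_reachable(
--     module_id: int,
--     modules: dict,
--     edge_types: list[str] | None = None,
-- ) -> set[int]:
--     """Level-synchronous (frontier-set) BFS instead of a FIFO queue."""
--     if edge_types is None:
--         edge_types = ["requires", "soft_requires"]
--
--     reachable: set[int] = {module_id}
--     frontier: set[int] = {module_id}
--
--     while frontier:
--         next_deps: set[int] = set()
--         for node in frontier:
--             mod_data = modules.get(node, {})
--             for edge_type in edge_types:
--                 deps = mod_data.get(edge_type, [])
--                 if deps is None:
--                     continue
--                 next_deps.update(deps)
--         frontier = next_deps - reachable
--         reachable |= frontier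
--
--     reachable.discard(module_id)
--     return reachable
-- ===== Notes on version B (the rewrite author's own statement) =====
-- stated objective: alternative
-- what changed: Replaces the FIFO queue with pop-time visited checks by a level-synchronous fixpoint BFS that keeps a reachable set and a frontier set and advances a whole level at a time via set difference and union.
import Mathlib
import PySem

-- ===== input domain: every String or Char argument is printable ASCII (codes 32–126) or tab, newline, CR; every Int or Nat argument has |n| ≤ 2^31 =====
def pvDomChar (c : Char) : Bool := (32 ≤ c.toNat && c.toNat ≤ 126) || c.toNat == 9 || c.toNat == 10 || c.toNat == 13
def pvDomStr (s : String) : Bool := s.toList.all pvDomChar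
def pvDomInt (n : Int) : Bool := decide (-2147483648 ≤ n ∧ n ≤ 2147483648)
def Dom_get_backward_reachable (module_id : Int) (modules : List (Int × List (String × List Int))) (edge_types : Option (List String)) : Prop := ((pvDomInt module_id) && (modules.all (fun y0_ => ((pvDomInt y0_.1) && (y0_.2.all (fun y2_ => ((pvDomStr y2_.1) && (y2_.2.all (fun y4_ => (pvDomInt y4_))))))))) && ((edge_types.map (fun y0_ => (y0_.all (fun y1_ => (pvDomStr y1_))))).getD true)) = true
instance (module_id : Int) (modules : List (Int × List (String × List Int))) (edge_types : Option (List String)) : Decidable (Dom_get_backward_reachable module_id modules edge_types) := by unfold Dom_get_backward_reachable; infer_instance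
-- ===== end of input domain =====

-- B replaces A's FIFO queue (pop one node, skip if visited) by a level-synchronous BFS on a
-- reachable set and a frontier set, advancing a whole level at a time (alternative decomposition,
-- same asymptotic cost; equality of the returned sets is proved as equality of insertion-order lists).

-- ===== PORT A =====
-- helpers shared by the termination measures of both loops
def gbrKeys (modules : List (Int × List (String × List Int))) : List Int := modules.map Prod.fst

def gbrTm (modules : List (Int × List (String × List Int))) : Nat :=
  (modules.map (fun p => ((p.2.map (fun s => s.2.length)).sum))).sum

def gbrNotIn (s : PySem.Set Int) : Int → Bool := fun x => !PySem.Set.contains s x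

def gbrK (modules : List (Int × List (String × List Int))) (s : PySem.Set Int) : Nat :=
  ((gbrKeys modules).filter (gbrNotIn s)).length

def gbrMeasA (modules : List (Int × List (String × List Int))) (ets : List String) (v : PySem.Set Int) (q : List Int) : Nat :=
  gbrK modules v * (ets.length * gbrTm modules + 1) + q.length

-- mod_data = modules.get(current, {})
def gbrModData (modules : List (Int × List (String × List Int))) (c : Int) : List (String × List Int) :=
  PySem.Dict.getD ⟨modules⟩ c []

-- the concatenation of all dep lists of one node over the edge types (proof-side view of A's inner loops)
def gbrDeps (modules : List (Int × List (String × List Int))) (ets : List String) (c : Int) : List Int :=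
  ets.flatMap (fun et => PySem.Dict.getD ⟨gbrModData modules c⟩ et [])

theorem gbr_contains_iff (s : PySem.Set Int) (x : Int) : PySem.Set.contains s x = true ↔ x ∈ s := by
  simp [PySem.Set.contains]

theorem gbr_filter_len_le (l : List Int) (p q : Int → Bool) (h : ∀ x, q x = true → p x = true) :
    (l.filter q).length ≤ (l.filter p).length := by
  induction l with
  | nil => simp
  | cons a l ih =>
    by_cases hq : q a = true
    · simp [hq, h a hq]; omega
    · simp only [List.filter_cons, Bool.not_eq_true] at *
      rw [if_neg (by simp [hq])]
      by_cases hp : p a = true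
      · simp [hp]; omega
      · rw [if_neg (by simp [hp])]; exact ih

theorem gbr_filter_len_lt (l : List Int) (p q : Int → Bool) (h : ∀ x, q x = true → p x = true)
    (x : Int) (hx : x ∈ l) (hp : p x = true) (hq : q x = false) :
    (l.filter q).length < (l.filter p).length := by
  induction l with
  | nil => simp at hx
  | cons a l ih =>
    rcases List.mem_cons.mp hx with rfl | hx
    · rw [List.filter_cons_of_neg (by simp [hq]), List.filter_cons_of_pos (by simp [hp])]
      simpa using Nat.lt_succ_of_le (gbr_filter_len_le l p q h)
    · rw [List.filter_cons, List.filter_cons]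
      by_cases hqa : q a = true
      · rw [if_pos (by simp [hqa]), if_pos (by simp [h a hqa])]
        simpa using ih hx
      · rw [if_neg (by simp [hqa])]
        by_cases hpa : p a = true
        · rw [if_pos (by simp [hpa])]
          exact Nat.lt_succ_of_lt (ih hx)
        · rw [if_neg (by simp [hpa])]; exact ih hx

theorem gbr_modData_eq_values (modules : List (Int × List (String × List Int))) (c : Int) :
    gbrModData modules c = [] ∨ ∃ p ∈ modules, gbrModData modules c = p.2 := by
  unfold gbrModData
  simp only [PySem.Dict.getD, PySem.Dict.get?, PySem.Dict.items]
  cases h1 : List.find? (fun p => p.1 == c) modules with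
  | none => left; rfl
  | some md => right; exact ⟨md, List.mem_of_find?_eq_some h1, rfl⟩

theorem gbr_inner_lookup_le (md : List (String × List Int)) (et : String) :
    (PySem.Dict.getD ⟨md⟩ et []).length ≤ (md.map (fun s => s.2.length)).sum := by
  simp only [PySem.Dict.getD, PySem.Dict.get?, PySem.Dict.items]
  cases h2 : List.find? (fun s => s.1 == et) md with
  | none => simp
  | some pr =>
    have hpr : pr ∈ md := List.mem_of_find?_eq_some h2
    simp only [Option.map_some, Option.getD_some]
    exact List.single_le_sum (by simp) _ (List.mem_map_of_mem hpr)

theorem gbr_lookup_le (modules : List (Int × List (String × List Int))) (c : Int) (et : String) :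
    (PySem.Dict.getD ⟨gbrModData modules c⟩ et []).length ≤ gbrTm modules := by
  rcases gbr_modData_eq_values modules c with h | ⟨p, hp, h⟩
  · rw [h]; simp [PySem.Dict.getD, PySem.Dict.get?, PySem.Dict.items]
  · rw [h]
    refine le_trans (gbr_inner_lookup_le p.2 et) ?_
    exact List.single_le_sum (by simp) _ (List.mem_map_of_mem hp)

theorem gbr_deps_le (modules : List (Int × List (String × List Int))) (ets : List String) (c : Int) :
    (gbrDeps modules ets c).length ≤ ets.length * gbrTm modules := by
  unfold gbrDeps
  induction ets with
  | nil => simp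
  | cons e ets ih =>
    rw [List.flatMap_cons, List.length_append, List.length_cons, Nat.succ_mul]
    have := gbr_lookup_le modules c e
    omega

theorem gbr_fold_inner (v' : PySem.Set Int) (dl : List Int) (q1 : List Int) :
    dl.foldl (fun q2 d => if PySem.Set.contains v' d then q2 else q2 ++ [d]) q1
      = q1 ++ dl.filter (gbrNotIn v') := by
  have he : (fun (q2 : List Int) d => if PySem.Set.contains v' d then q2 else q2 ++ [d])
      = (fun q2 d => if gbrNotIn v' d = true then q2 ++ [id d] else q2) := by
    funext q2 d
    by_cases hd : PySem.Set.contains v' d <;> simp [gbrNotIn, hd]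
  rw [he, PySem.List.foldl_append_if (gbrNotIn v') id dl q1]
  simp

-- A's nested append loops, rewritten as one append of a filtered concatenation
theorem gbr_foldA (modules : List (Int × List (String × List Int))) (ets : List String)
    (c : Int) (v' : PySem.Set Int) (q : List Int) :
    ets.foldl (fun q1 et =>
        (PySem.Dict.getD ⟨gbrModData modules c⟩ et []).foldl (fun q2 d =>
          if PySem.Set.contains v' d then q2 else q2 ++ [d]) q1) q
      = q ++ (gbrDeps modules ets c).filter (gbrNotIn v') := by
  induction ets generalizing q with
  | nil => simp [gbrDeps]
  | cons e ets ih =>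
    rw [List.foldl_cons, ih, gbr_fold_inner]
    unfold gbrDeps
    rw [List.flatMap_cons, List.filter_append, List.append_assoc]

-- a node outside the keys contributes no dependencies
theorem gbr_modData_nil (modules : List (Int × List (String × List Int))) (c : Int)
    (hc : c ∉ gbrKeys modules) : gbrModData modules c = [] := by
  unfold gbrModData
  have h : PySem.Dict.get? (⟨modules⟩ : PySem.Dict Int (List (String × List Int))) c = none := by
    rw [PySem.Dict.get?_eq_none_iff_not_mem_keys]
    simpa [PySem.Dict.keys, PySem.Dict.items, gbrKeys] using hc
  simp [PySem.Dict.getD, h]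

theorem gbr_deps_nil (modules : List (Int × List (String × List Int))) (ets : List String) (c : Int)
    (hc : c ∉ gbrKeys modules) : gbrDeps modules ets c = [] := by
  unfold gbrDeps
  rw [gbr_modData_nil modules c hc]
  have : ∀ et : String, PySem.Dict.getD (⟨[]⟩ : PySem.Dict String (List Int)) et [] = [] := fun _ => rfl
  simp [this]

theorem gbr_decA (modules : List (Int × List (String × List Int))) (ets : List String)
    (v : PySem.Set Int) (c : Int) (rest : List Int) (h : PySem.Set.contains v c = false) :
    gbrMeasA modules ets (PySem.Set.add v c)
        (rest ++ (gbrDeps modules ets c).filter (gbrNotIn (PySem.Set.add v c)))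
      < gbrMeasA modules ets v (c :: rest) := by
  unfold gbrMeasA
  have himp : ∀ x, gbrNotIn (PySem.Set.add v c) x = true → gbrNotIn v x = true := by
    intro x hx
    simp only [gbrNotIn, Bool.not_eq_true', ← Bool.not_eq_true] at *
    intro hv
    exact hx ((gbr_contains_iff _ _).mpr ((PySem.Set.mem_add v c x).mpr (Or.inl ((gbr_contains_iff _ _).mp hv))))
  have hD : ((gbrDeps modules ets c).filter (gbrNotIn (PySem.Set.add v c))).length
      ≤ ets.length * gbrTm modules :=
    le_trans (List.length_filter_le _ _) (gbr_deps_le modules ets c)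
  by_cases hc : c ∈ gbrKeys modules
  · have hK : gbrK modules (PySem.Set.add v c) < gbrK modules v := by
      refine gbr_filter_len_lt _ _ _ himp c hc ?_ ?_
      · unfold gbrNotIn; rw [h]; rfl
      · unfold gbrNotIn
        rw [(gbr_contains_iff _ _).mpr ((PySem.Set.mem_add v c c).mpr (Or.inr rfl))]
        rfl
    have h1 : (gbrK modules (PySem.Set.add v c) + 1) * (ets.length * gbrTm modules + 1)
        ≤ gbrK modules v * (ets.length * gbrTm modules + 1) := Nat.mul_le_mul_right _ hK
    rw [add_mul, one_mul] at h1
    simp only [List.length_append, List.length_cons]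
    omega
  · have hdn : gbrDeps modules ets c = [] := gbr_deps_nil _ _ _ hc
    have hK : gbrK modules (PySem.Set.add v c) ≤ gbrK modules v := gbr_filter_len_le _ _ _ himp
    have h1 : gbrK modules (PySem.Set.add v c) * (ets.length * gbrTm modules + 1)
        ≤ gbrK modules v * (ets.length * gbrTm modules + 1) := Nat.mul_le_mul_right _ hK
    rw [hdn]
    simp only [List.filter_nil, List.append_nil, List.length_cons]
    omega

def gbrLoopA (modules : List (Int × List (String × List Int))) (ets : List String)
    (v : PySem.Set Int) (q : List Int) : PySem.Set Int :=
  match q with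
  | [] => v
  | c :: rest =>
    if PySem.Set.contains v c then
      gbrLoopA modules ets v rest
    else
      gbrLoopA modules ets (PySem.Set.add v c)
        (ets.foldl (fun q1 et =>
          (PySem.Dict.getD ⟨gbrModData modules c⟩ et []).foldl (fun q2 d =>
            if PySem.Set.contains (PySem.Set.add v c) d then q2 else q2 ++ [d]) q1) rest)
termination_by gbrMeasA modules ets v q
decreasing_by
  · simp [gbrMeasA]
  · simp only [dite_eq_ite]
    rw [List.foldl_attach (l := ets) (f := fun q1 et =>
      List.foldl (fun q2 d => if PySem.Set.contains (PySem.Set.add v c) d then q2 else q2 ++ [d]) q1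
        (PySem.Dict.getD ⟨gbrModData modules c⟩ et []))]
    rw [gbr_foldA]
    exact gbr_decA modules ets v c rest (by simpa using ‹¬ PySem.Set.contains v c = true›)

def get_backward_reachable (module_id : Int) (modules : List (Int × List (String × List Int))) (edge_types : Option (List String)) : List Int :=
  PySem.Set.discard
    (gbrLoopA modules (edge_types.getD ["requires", "soft_requires"]) PySem.Set.empty [module_id])
    module_id

-- ===== PORT B =====
-- next_deps: all deps of the frontier, as a set
def gbrNext (modules : List (Int × List (String × List Int))) (ets : List String)
    (f : PySem.Set Int) : PySem.Set Int :=
  f.foldl (fun nd node =>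
    ets.foldl (fun nd2 et =>
      PySem.Set.update nd2 (PySem.Dict.getD ⟨gbrModData modules node⟩ et [])) nd)
    PySem.Set.empty

def gbrMeasB (modules : List (Int × List (String × List Int))) (r f : PySem.Set Int) : Nat :=
  3 * gbrK modules r +
    (if f.isEmpty then 0 else if f.any (fun x => (gbrKeys modules).contains x) then 2 else 1)

theorem gbr_mem_foldl_add (l : List Int) (s : PySem.Set Int) (x : Int) :
    x ∈ l.foldl PySem.Set.add s ↔ x ∈ s ∨ x ∈ l := by
  induction l generalizing s with
  | nil => simp
  | cons a l ih => simp [ih, PySem.Set.mem_add]; tauto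

theorem gbr_next_nil (modules : List (Int × List (String × List Int))) (ets : List String)
    (f : PySem.Set Int) (h : ∀ x ∈ f, x ∉ gbrKeys modules) :
    gbrNext modules ets f = [] := by
  unfold gbrNext
  have hinner : ∀ (l : List String) (nd : PySem.Set Int),
      l.foldl (fun nd2 et => PySem.Set.update nd2 (PySem.Dict.getD (⟨[]⟩ : PySem.Dict String (List Int)) et [])) nd = nd := by
    intro l
    induction l with
    | nil => intro nd; rfl
    | cons e l ih => intro nd; rw [List.foldl_cons]; exact ih _
  have : ∀ (g : List Int), (∀ x ∈ g, x ∉ gbrKeys modules) →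
      g.foldl (fun nd node =>
        ets.foldl (fun nd2 et =>
          PySem.Set.update nd2 (PySem.Dict.getD ⟨gbrModData modules node⟩ et [])) nd) PySem.Set.empty = [] := by
    intro g
    induction g with
    | nil => intro _; rfl
    | cons c g ih =>
      intro hg
      have hc : gbrModData modules c = [] := gbr_modData_nil modules c (hg c List.mem_cons_self)
      rw [List.foldl_cons, hc, hinner ets]
      exact ih (fun x hx => hg x (List.mem_cons_of_mem _ hx))
  exact this f h

theorem gbr_decB (modules : List (Int × List (String × List Int))) (ets : List String)
    (r f : PySem.Set Int) (hf : f.isEmpty = false) :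
    gbrMeasB modules (PySem.Set.union r (PySem.Set.diff (gbrNext modules ets f) r))
        (PySem.Set.diff (gbrNext modules ets f) r)
      < gbrMeasB modules r f := by
  have hRHS : gbrMeasB modules r f
      = 3 * gbrK modules r + (if f.any (fun x => (gbrKeys modules).contains x) then 2 else 1) := by
    unfold gbrMeasB; rw [hf]; rfl
  rw [hRHS]
  by_cases h0 : PySem.Set.diff (gbrNext modules ets f) r = []
  · rw [h0]
    have hr : PySem.Set.union r ([] : List Int) = r := rfl
    rw [hr, show gbrMeasB modules r [] = 3 * gbrK modules r from by unfold gbrMeasB; simp]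
    split <;> omega
  · -- the frontier produced deps, so some frontier node is a key
    have hkey : f.any (fun x => (gbrKeys modules).contains x) = true := by
      by_contra hno
      have hnk : ∀ x ∈ f, x ∉ gbrKeys modules := by
        intro x hx hmem
        exact hno (List.any_eq_true.mpr ⟨x, hx, by simpa using hmem⟩)
      rw [gbr_next_nil modules ets f hnk] at h0
      exact h0 rfl
    rw [if_pos hkey]
    have hsub : ∀ x, gbrNotIn (PySem.Set.union r (PySem.Set.diff (gbrNext modules ets f) r)) x = true →
        gbrNotIn r x = true := by
      intro x hx
      simp only [gbrNotIn, Bool.not_eq_true', ← Bool.not_eq_true] at *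
      intro hv
      refine hx ((gbr_contains_iff _ _).mpr ?_)
      have hxr : x ∈ r := (gbr_contains_iff _ _).mp hv
      unfold PySem.Set.union PySem.Set.update
      exact (gbr_mem_foldl_add _ _ _).mpr (Or.inl hxr)
    have hKle : gbrK modules (PySem.Set.union r (PySem.Set.diff (gbrNext modules ets f) r)) ≤ gbrK modules r :=
      gbr_filter_len_le _ _ _ hsub
    have hw : (if (PySem.Set.diff (gbrNext modules ets f) r).isEmpty then 0
        else if (PySem.Set.diff (gbrNext modules ets f) r).any (fun x => (gbrKeys modules).contains x) then 2 else 1) ≤ 2 := by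
      split
      · omega
      · split <;> omega
    by_cases hk' : (PySem.Set.diff (gbrNext modules ets f) r).any (fun x => (gbrKeys modules).contains x) = true
    · -- the new frontier contains a key not yet in r: the key count strictly drops
      rcases List.any_eq_true.mp hk' with ⟨x, hxf, hxk⟩
      have hxk : x ∈ gbrKeys modules := by simpa using hxk
      have hxr : x ∉ r := by
        have hmf := List.of_mem_filter (p := gbrNotIn r) (by simpa [PySem.Set.diff, gbrNotIn] using hxf)
        simp only [gbrNotIn, Bool.not_eq_true'] at hmf
        exact fun hm => by rw [(gbr_contains_iff _ _).mpr hm] at hmf; cases hmf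
      have hxu : x ∈ PySem.Set.union r (PySem.Set.diff (gbrNext modules ets f) r) := by
        unfold PySem.Set.union PySem.Set.update
        exact (gbr_mem_foldl_add _ _ _).mpr (Or.inr hxf)
      have hKlt : gbrK modules (PySem.Set.union r (PySem.Set.diff (gbrNext modules ets f) r)) < gbrK modules r := by
        refine gbr_filter_len_lt _ _ _ hsub x hxk ?_ ?_
        · unfold gbrNotIn
          rw [show PySem.Set.contains r x = false by
            cases hcx : PySem.Set.contains r x
            · rfl
            · exact absurd ((gbr_contains_iff _ _).mp hcx) hxr]
          rfl
        · unfold gbrNotIn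
          rw [(gbr_contains_iff _ _).mpr hxu]
          rfl
      unfold gbrMeasB
      omega
    · unfold gbrMeasB
      rw [if_neg (by simpa using h0), if_neg hk']
      omega

def gbrLoopB (modules : List (Int × List (String × List Int))) (ets : List String)
    (r f : PySem.Set Int) : PySem.Set Int :=
  if h : f.isEmpty then r
  else
    gbrLoopB modules ets
      (PySem.Set.union r (PySem.Set.diff (gbrNext modules ets f) r))
      (PySem.Set.diff (gbrNext modules ets f) r)
termination_by gbrMeasB modules r f
decreasing_by exact gbr_decB modules ets r f (by simpa using h)

def get_backward_reachable_alt (module_id : Int) (modules : List (Int × List (String × List Int))) (edge_types : Option (List String)) : List Int :=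
  PySem.Set.discard
    (gbrLoopB modules (edge_types.getD ["requires", "soft_requires"])
      (PySem.Set.ofList [module_id]) (PySem.Set.ofList [module_id]))
    module_id

-- ===== PRECONDITION & SPEC =====
def Spec_get_backward_reachable (module_id : Int) (modules : List (Int × List (String × List Int))) (edge_types : Option (List String)) (out : List Int) : Prop := out = get_backward_reachable_alt module_id modules edge_types
instance (module_id : Int) (modules : List (Int × List (String × List Int))) (edge_types : Option (List String)) (out : List Int) : Decidable (Spec_get_backward_reachable module_id modules edge_types out) := by unfold Spec_get_backward_reachable; infer_instance

-- ===== CLAIM (what is proved, stated in full; the proofs are below) =====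
def Claim_equal_get_backward_reachable : Prop := ∀ (module_id : Int) (modules : List (Int × List (String × List Int))) (edge_types : Option (List String)), Dom_get_backward_reachable module_id modules edge_types → Spec_get_backward_reachable module_id modules edge_types (get_backward_reachable module_id modules edge_types)

-- ===== LEMMAS AND PROOFS =====

theorem gbr_contains_eq (s : PySem.Set Int) (x : Int) :
    PySem.Set.contains s x = decide (x ∈ s) := by
  simp [PySem.Set.contains]

theorem gbr_notIn_append (s t : List Int) (a : Int) :
    gbrNotIn (s ++ t) a = (gbrNotIn s a && gbrNotIn t a) := by
  by_cases h1 : a ∈ s <;> by_cases h2 : a ∈ t <;>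
    simp [gbrNotIn, gbr_contains_eq, h1, h2]

theorem gbr_filter_absorb (l : List Int) (p q : Int → Bool) (h : ∀ a, p a = true → q a = true) :
    (l.filter q).filter p = l.filter p := by
  rw [List.filter_filter]
  exact List.filter_congr (fun a _ => by
    cases hp : p a
    · simp
    · simp [h a hp])

-- one-step equations for the two loops
theorem gbr_loopA_nil (modules : List (Int × List (String × List Int))) (ets : List String)
    (v : PySem.Set Int) : gbrLoopA modules ets v [] = v := by
  rw [gbrLoopA]

theorem gbr_loopA_skip (modules : List (Int × List (String × List Int))) (ets : List String)
    (v : PySem.Set Int) (c : Int) (rest : List Int) (h : PySem.Set.contains v c = true) :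
    gbrLoopA modules ets v (c :: rest) = gbrLoopA modules ets v rest := by
  rw [gbrLoopA, if_pos h]

theorem gbr_loopA_visit (modules : List (Int × List (String × List Int))) (ets : List String)
    (v : PySem.Set Int) (c : Int) (rest : List Int) (h : PySem.Set.contains v c = false) :
    gbrLoopA modules ets v (c :: rest)
      = gbrLoopA modules ets (PySem.Set.add v c)
          (rest ++ (gbrDeps modules ets c).filter (gbrNotIn (PySem.Set.add v c))) := by
  rw [gbrLoopA, if_neg (by rw [h]; simp), gbr_foldA]

theorem gbr_loopB_nil (modules : List (Int × List (String × List Int))) (ets : List String)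
    (r : PySem.Set Int) : gbrLoopB modules ets r [] = r := by
  rw [gbrLoopB]
  rfl

theorem gbr_loopB_step (modules : List (Int × List (String × List Int))) (ets : List String)
    (r f : PySem.Set Int) (h : f ≠ []) :
    gbrLoopB modules ets r f
      = gbrLoopB modules ets
          (PySem.Set.union r (PySem.Set.diff (gbrNext modules ets f) r))
          (PySem.Set.diff (gbrNext modules ets f) r) := by
  rw [gbrLoopB, dif_neg (by simpa using h)]

-- foldl add with any accumulator, split off the accumulator
theorem gbr_ofList_split : ∀ (xs : List Int) (s : PySem.Set Int),
    xs.foldl PySem.Set.add s = s ++ PySem.Set.ofList (xs.filter (gbrNotIn s)) := by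
  suffices H : ∀ (n : Nat) (xs : List Int), xs.length ≤ n → ∀ (s : PySem.Set Int),
      xs.foldl PySem.Set.add s = s ++ PySem.Set.ofList (xs.filter (gbrNotIn s)) by
    exact fun xs s => H xs.length xs le_rfl s
  intro n
  induction n with
  | zero =>
    intro xs hlen s
    rw [List.length_eq_zero_iff.mp (Nat.le_zero.mp hlen)]
    simp [PySem.Set.ofList]
  | succ n ih =>
    intro xs hlen s
    cases xs with
    | nil => simp [PySem.Set.ofList]
    | cons x l =>
      rw [List.foldl_cons]
      by_cases hx : PySem.Set.contains s x = true
      · have hadd : PySem.Set.add s x = s := by unfold PySem.Set.add; rw [if_pos hx]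
        rw [hadd, List.filter_cons_of_neg (by unfold gbrNotIn; rw [hx]; simp)]
        exact ih l (by simpa using hlen) s
      · have hx' : PySem.Set.contains s x = false := by simpa using hx
        have hadd : PySem.Set.add s x = s ++ [x] := by unfold PySem.Set.add; rw [if_neg hx]
        rw [hadd, List.filter_cons_of_pos (by unfold gbrNotIn; rw [hx']; rfl),
          ih l (by simpa using hlen) (s ++ [x])]
        have hof : PySem.Set.ofList (x :: l.filter (gbrNotIn s))
            = x :: PySem.Set.ofList ((l.filter (gbrNotIn s)).filter (gbrNotIn [x])) := by
          show List.foldl PySem.Set.add PySem.Set.empty (x :: l.filter (gbrNotIn s)) = _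
          rw [List.foldl_cons]
          rw [show PySem.Set.add PySem.Set.empty x = [x] from rfl]
          exact ih (l.filter (gbrNotIn s)) (le_trans (List.length_filter_le _ _) (by simpa using hlen)) [x]
        rw [hof]
        have hff : l.filter (gbrNotIn (s ++ [x])) = (l.filter (gbrNotIn s)).filter (gbrNotIn [x]) := by
          rw [List.filter_filter]
          exact List.filter_congr (fun a _ => by rw [gbr_notIn_append, Bool.and_comm])
        rw [hff, List.append_assoc]
        rfl

theorem gbr_update_append (s : PySem.Set Int) (a b : List Int) :
    PySem.Set.update (PySem.Set.update s a) b = PySem.Set.update s (a ++ b) := by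
  unfold PySem.Set.update
  exact (List.foldl_append).symm

theorem gbr_mem_update (s : PySem.Set Int) (l : List Int) (x : Int) :
    x ∈ PySem.Set.update s l ↔ x ∈ s ∨ x ∈ l :=
  gbr_mem_foldl_add l s x

theorem gbr_ofList_cons (x : Int) (xs : List Int) :
    PySem.Set.ofList (x :: xs) = x :: PySem.Set.ofList (xs.filter (gbrNotIn [x])) := by
  show List.foldl PySem.Set.add PySem.Set.empty (x :: xs) = _
  rw [List.foldl_cons, show PySem.Set.add PySem.Set.empty x = [x] from rfl, gbr_ofList_split]
  rfl

-- ofList commutes with filter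
theorem gbr_ofList_filter (p : Int → Bool) : ∀ (xs : List Int),
    PySem.Set.ofList (xs.filter p) = (PySem.Set.ofList xs).filter p := by
  suffices H : ∀ (n : Nat) (xs : List Int), xs.length ≤ n →
      PySem.Set.ofList (xs.filter p) = (PySem.Set.ofList xs).filter p by
    exact fun xs => H xs.length xs le_rfl
  intro n
  induction n with
  | zero =>
    intro xs hlen
    rw [List.length_eq_zero_iff.mp (Nat.le_zero.mp hlen)]
    rfl
  | succ n ih =>
    intro xs hlen
    cases xs with
    | nil => rfl
    | cons x l =>
      rw [gbr_ofList_cons x l]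
      by_cases hp : p x = true
      · rw [List.filter_cons_of_pos hp, gbr_ofList_cons x (l.filter p), List.filter_cons_of_pos hp,
          ← ih (l.filter (gbrNotIn [x])) (le_trans (List.length_filter_le _ _) (by simpa using hlen))]
        rw [List.filter_filter, List.filter_filter]
        congr 1
        exact congrArg (PySem.Set.ofList (α := Int)) (List.filter_congr (fun a _ => Bool.and_comm _ _))
      · have hp' : p x = false := by simpa using hp
        rw [List.filter_cons_of_neg (by simp [hp']), List.filter_cons_of_neg (by simp [hp']),
          ← ih (l.filter (gbrNotIn [x])) (le_trans (List.length_filter_le _ _) (by simpa using hlen))]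
        have himp : ∀ a, p a = true → gbrNotIn [x] a = true := by
          intro a ha
          have hax : a ≠ x := fun he => by rw [he, hp'] at ha; cases ha
          unfold gbrNotIn
          rw [show PySem.Set.contains [x] a = false from by simp [gbr_contains_eq, hax]]
          rfl
        rw [gbr_filter_absorb l p (gbrNotIn [x]) himp]

theorem gbr_ofList_append_left (a b : List Int) :
    PySem.Set.ofList (PySem.Set.ofList a ++ b) = PySem.Set.ofList (a ++ b) := by
  have h1 : ∀ (u v : List Int), PySem.Set.ofList (u ++ v) = v.foldl PySem.Set.add (PySem.Set.ofList u) := by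
    intro u v
    unfold PySem.Set.ofList
    exact List.foldl_append
  rw [h1, h1, PySem.Set.ofList_ofList]

-- normalized queue: first occurrences of the not-yet-visited elements
def gbrCanon (v : PySem.Set Int) (q : List Int) : List Int :=
  PySem.Set.ofList (q.filter (gbrNotIn v))

-- the dep stream of a whole frontier
def gbrStream (modules : List (Int × List (String × List Int))) (ets : List String) (f : List Int) : List Int :=
  f.flatMap (gbrDeps modules ets)

-- what A appends to its queue while it pops a whole level f
def gbrApp (modules : List (Int × List (String × List Int))) (ets : List String) :
    PySem.Set Int → List Int → List Int
  | _, [] => []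
  | v, c :: f' =>
      (gbrDeps modules ets c).filter (gbrNotIn (PySem.Set.add v c))
        ++ gbrApp modules ets (PySem.Set.add v c) f'

theorem gbr_step (modules : List (Int × List (String × List Int))) (ets : List String) :
    ∀ (f : List Int) (v : PySem.Set Int) (t : List Int), f.Nodup →
      (∀ x ∈ f, PySem.Set.contains v x = false) →
      gbrLoopA modules ets v (f ++ t)
        = gbrLoopA modules ets (PySem.Set.update v f) (t ++ gbrApp modules ets v f) := by
  intro f
  induction f with
  | nil => intro v t _ _; simp [gbrApp, PySem.Set.update]
  | cons c f' ih =>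
    intro v t hnd hdis
    rw [List.cons_append, gbr_loopA_visit modules ets v c (f' ++ t) (hdis c List.mem_cons_self),
      List.append_assoc]
    have hdis' : ∀ x ∈ f', PySem.Set.contains (PySem.Set.add v c) x = false := by
      intro x hx
      have h1 : x ∉ v := by
        have := hdis x (List.mem_cons_of_mem _ hx)
        intro hm; rw [(gbr_contains_iff _ _).mpr hm] at this; cases this
      have h2 : x ≠ c := fun he => (List.nodup_cons.mp hnd).1 (he ▸ hx)
      cases hcx : PySem.Set.contains (PySem.Set.add v c) x
      · rfl
      · rcases (PySem.Set.mem_add v c x).mp ((gbr_contains_iff _ _).mp hcx) with h | h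
        · exact absurd h h1
        · exact absurd h h2
    rw [ih (PySem.Set.add v c) (t ++ (gbrDeps modules ets c).filter (gbrNotIn (PySem.Set.add v c)))
      (List.nodup_cons.mp hnd).2 hdis']
    rw [show PySem.Set.update v (c :: f') = PySem.Set.update (PySem.Set.add v c) f' from rfl]
    rw [show gbrApp modules ets v (c :: f')
      = (gbrDeps modules ets c).filter (gbrNotIn (PySem.Set.add v c)) ++ gbrApp modules ets (PySem.Set.add v c) f' from rfl]
    rw [List.append_assoc]

theorem gbr_app_filter (modules : List (Int × List (String × List Int))) (ets : List String) :
    ∀ (f : List Int) (v V : PySem.Set Int),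
      (∀ x ∈ v, x ∈ V) → (∀ x ∈ f, x ∈ V) →
      (gbrApp modules ets v f).filter (gbrNotIn V)
        = (gbrStream modules ets f).filter (gbrNotIn V) := by
  intro f
  induction f with
  | nil => intro v V _ _; rfl
  | cons c f' ih =>
    intro v V hv hf
    rw [show gbrApp modules ets v (c :: f')
      = (gbrDeps modules ets c).filter (gbrNotIn (PySem.Set.add v c)) ++ gbrApp modules ets (PySem.Set.add v c) f' from rfl]
    rw [show gbrStream modules ets (c :: f') = gbrDeps modules ets c ++ gbrStream modules ets f' from
      by unfold gbrStream; rw [List.flatMap_cons]]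
    rw [List.filter_append, List.filter_append]
    have himp : ∀ a, gbrNotIn V a = true → gbrNotIn (PySem.Set.add v c) a = true := by
      intro a ha
      have haV : a ∉ V := by
        intro hm
        unfold gbrNotIn at ha
        rw [(gbr_contains_iff _ _).mpr hm] at ha
        cases ha
      have hnm : a ∉ PySem.Set.add v c := by
        intro hm
        rcases (PySem.Set.mem_add v c a).mp hm with h | h
        · exact haV (hv a h)
        · exact haV (h ▸ hf c List.mem_cons_self)
      simp [gbrNotIn, gbr_contains_eq, hnm]
    have hrec := ih (PySem.Set.add v c) V
      (fun x hx => by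
        rcases (PySem.Set.mem_add v c x).mp hx with h | h
        · exact hv x h
        · exact h ▸ hf c List.mem_cons_self)
      (fun x hx => hf x (List.mem_cons_of_mem _ hx))
    rw [gbr_filter_absorb _ _ _ himp, hrec]

theorem gbr_next_eq (modules : List (Int × List (String × List Int))) (ets : List String)
    (f : PySem.Set Int) :
    gbrNext modules ets f = PySem.Set.ofList (gbrStream modules ets f) := by
  have hinner : ∀ (node : Int) (l : List String) (nd : PySem.Set Int),
      l.foldl (fun nd2 et => PySem.Set.update nd2 (PySem.Dict.getD ⟨gbrModData modules node⟩ et [])) nd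
        = PySem.Set.update nd (l.flatMap (fun et => PySem.Dict.getD ⟨gbrModData modules node⟩ et [])) := by
    intro node l
    induction l with
    | nil => intro nd; rfl
    | cons e l ihl =>
      intro nd
      rw [List.foldl_cons, ihl, gbr_update_append, List.flatMap_cons]
  have houter : ∀ (g : List Int) (acc : PySem.Set Int),
      g.foldl (fun nd node =>
        ets.foldl (fun nd2 et =>
          PySem.Set.update nd2 (PySem.Dict.getD ⟨gbrModData modules node⟩ et [])) nd) acc
        = PySem.Set.update acc (g.flatMap (gbrDeps modules ets)) := by
    intro g
    induction g with
    | nil => intro acc; rfl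
    | cons c g ihg =>
      intro acc
      rw [List.foldl_cons, hinner c ets acc, ihg, gbr_update_append, List.flatMap_cons]
      rfl
  rw [show gbrNext modules ets f
    = f.foldl (fun nd node =>
        ets.foldl (fun nd2 et =>
          PySem.Set.update nd2 (PySem.Dict.getD ⟨gbrModData modules node⟩ et [])) nd) PySem.Set.empty from rfl]
  rw [houter f PySem.Set.empty]
  rfl

theorem gbr_norm (modules : List (Int × List (String × List Int))) (ets : List String) :
    ∀ (n : Nat) (v : PySem.Set Int) (q : List Int), gbrMeasA modules ets v q ≤ n →
      gbrLoopA modules ets v q = gbrLoopA modules ets v (gbrCanon v q) := by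
  intro n
  induction n with
  | zero =>
    intro v q h
    have hq : q = [] := by
      cases q with
      | nil => rfl
      | cons x l => exfalso; unfold gbrMeasA at h; simp at h
    rw [hq]
    rfl
  | succ n ih =>
    intro v q h
    cases q with
    | nil => rfl
    | cons x rest =>
      by_cases hx : PySem.Set.contains v x = true
      · have hcanon : gbrCanon v (x :: rest) = gbrCanon v rest := by
          unfold gbrCanon
          rw [List.filter_cons_of_neg (by unfold gbrNotIn; rw [hx]; simp)]
        have hm : gbrMeasA modules ets v rest ≤ n := by
          unfold gbrMeasA at h ⊢; simp at h; omega
        rw [gbr_loopA_skip modules ets v x rest hx, hcanon]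
        exact ih v rest hm
      · have hx' : PySem.Set.contains v x = false := by simpa using hx
        have hadd : PySem.Set.add v x = v ++ [x] := by unfold PySem.Set.add; rw [if_neg hx]
        set v' := PySem.Set.add v x with hv'
        set D := (gbrDeps modules ets x).filter (gbrNotIn v') with hD
        set T := PySem.Set.ofList (rest.filter (gbrNotIn v')) with hT
        have hcanon : gbrCanon v (x :: rest) = x :: T := by
          unfold gbrCanon
          rw [List.filter_cons_of_pos (by unfold gbrNotIn; rw [hx']; rfl), gbr_ofList_cons, hT]
          congr 2
          rw [List.filter_filter]
          refine List.filter_congr (fun a _ => ?_)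
          rw [show v' = v ++ [x] from hadd, gbr_notIn_append]
          exact Bool.and_comm _ _
        have hm1 : gbrMeasA modules ets v' (rest ++ D) ≤ n := by
          have h1 := gbr_decA modules ets v x rest hx'
          rw [← hv'] at h1
          rw [← hD] at h1
          omega
        have hTlen : T.length ≤ rest.length :=
          le_trans (PySem.Set.length_ofList_le _) (List.length_filter_le _ _)
        have hm2 : gbrMeasA modules ets v' (T ++ D) ≤ n := by
          have h1 := gbr_decA modules ets v x rest hx'
          rw [← hv'] at h1
          rw [← hD] at h1
          unfold gbrMeasA at *
          simp only [List.length_append] at *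
          omega
        have hcanon2 : gbrCanon v' (rest ++ D) = gbrCanon v' (T ++ D) := by
          unfold gbrCanon
          rw [List.filter_append, List.filter_append]
          have hTfix : T.filter (gbrNotIn v') = T := by
            refine List.filter_eq_self.mpr (fun a ha => ?_)
            exact List.of_mem_filter ((PySem.Set.mem_ofList _ a).mp (hT ▸ ha))
          rw [hTfix, hT, gbr_ofList_append_left]
        calc gbrLoopA modules ets v (x :: rest)
            = gbrLoopA modules ets v' (rest ++ D) := gbr_loopA_visit modules ets v x rest hx'
          _ = gbrLoopA modules ets v' (gbrCanon v' (rest ++ D)) := ih v' (rest ++ D) hm1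
          _ = gbrLoopA modules ets v' (gbrCanon v' (T ++ D)) := by rw [hcanon2]
          _ = gbrLoopA modules ets v' (T ++ D) := (ih v' (T ++ D) hm2).symm
          _ = gbrLoopA modules ets v (x :: T) := (gbr_loopA_visit modules ets v x T hx').symm
          _ = gbrLoopA modules ets v (gbrCanon v (x :: rest)) := by rw [hcanon]

theorem gbr_main (modules : List (Int × List (String × List Int))) (ets : List String) :
    ∀ (n : Nat) (v : PySem.Set Int) (f : List Int),
      gbrMeasB modules (PySem.Set.update v f) f ≤ n →
      f.Nodup → (∀ x ∈ f, PySem.Set.contains v x = false) →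
      gbrLoopA modules ets v f = gbrLoopB modules ets (PySem.Set.update v f) f := by
  intro n
  induction n with
  | zero =>
    intro v f h _ _
    cases f with
    | nil => rw [gbr_loopA_nil, gbr_loopB_nil]; rfl
    | cons x rest =>
      exfalso
      unfold gbrMeasB at h
      rw [show (x :: rest).isEmpty = false from rfl, if_neg (by simp)] at h
      by_cases hany : (x :: rest).any (fun y => (gbrKeys modules).contains y) = true
      · rw [if_pos hany] at h; omega
      · rw [if_neg hany] at h; omega
  | succ n ih =>
    intro v f h hnd hdis
    cases hf : f with
    | nil => rw [gbr_loopA_nil, gbr_loopB_nil]; rfl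
    | cons x rest =>
      rw [← hf]
      have hfne : f ≠ [] := by rw [hf]; exact List.cons_ne_nil x rest
      set V := PySem.Set.update v f with hV
      set c := PySem.Set.diff (gbrNext modules ets f) V with hc
      have hVV : ∀ x ∈ v, x ∈ V := fun x hx => (gbr_mem_update v f x).mpr (Or.inl hx)
      have hfV : ∀ x ∈ f, x ∈ V := fun x hx => (gbr_mem_update v f x).mpr (Or.inr hx)
      have hcanon : gbrCanon V (gbrApp modules ets v f) = c := by
        unfold gbrCanon
        rw [gbr_app_filter modules ets f v V hVV hfV]
        rw [gbr_ofList_filter, ← gbr_next_eq]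
        rfl
      have hchain : gbrLoopA modules ets v f = gbrLoopA modules ets V c := by
        calc gbrLoopA modules ets v f
            = gbrLoopA modules ets v (f ++ []) := by rw [List.append_nil]
          _ = gbrLoopA modules ets V ([] ++ gbrApp modules ets v f) := gbr_step modules ets f v [] hnd hdis
          _ = gbrLoopA modules ets V (gbrApp modules ets v f) := by rw [List.nil_append]
          _ = gbrLoopA modules ets V (gbrCanon V (gbrApp modules ets v f)) :=
              gbr_norm modules ets (gbrMeasA modules ets V (gbrApp modules ets v f)) V _ le_rfl
          _ = gbrLoopA modules ets V c := by rw [hcanon]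
      have hcnd : c.Nodup := by
        rw [hc, gbr_next_eq]
        exact (PySem.Set.nodup_ofList _).filter _
      have hcdis : ∀ x ∈ c, PySem.Set.contains V x = false := by
        intro x hx
        have := List.of_mem_filter (p := gbrNotIn V) (by simpa [hc, PySem.Set.diff, gbrNotIn] using hx)
        simpa [gbrNotIn] using this
      have hmeas : gbrMeasB modules (PySem.Set.update V c) c ≤ n := by
        have hdec := gbr_decB modules ets V f (by rw [hf]; rfl)
        have hu : PySem.Set.union V (PySem.Set.diff (gbrNext modules ets f) V) = PySem.Set.update V c := by
          rw [hc]; rfl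
        rw [hu, ← hc] at hdec
        omega
      rw [hchain, ih V c hmeas hcnd hcdis]
      rw [gbr_loopB_step modules ets V f hfne, ← hc,
        show PySem.Set.union V c = PySem.Set.update V c from rfl]

-- ===== VERDICT (by name: the statement is the Claim_ definition above) =====
theorem get_backward_reachable_spec : Claim_equal_get_backward_reachable := by
  intro module_id modules edge_types _
  unfold Spec_get_backward_reachable get_backward_reachable get_backward_reachable_alt
  have h := gbr_main modules (edge_types.getD ["requires", "soft_requires"])
    (gbrMeasB modules (PySem.Set.update PySem.Set.empty [module_id]) [module_id])
    PySem.Set.empty [module_id] le_rfl (by simp) (by intro x hx; simp at hx; subst hx; rfl)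
  have e1 : PySem.Set.update (PySem.Set.empty (α := Int)) [module_id] = PySem.Set.ofList [module_id] := rfl
  have e2 : PySem.Set.ofList [module_id] = [module_id] := rfl
  rw [h, e1, e2]
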